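-- pv_equiv track=rewrite | github.com/Aasthaengg/IBMdataset | Python_codes/p03478/s541691237.py | calc
-- ===== SOURCE A (Python) =====
-- def calc(num, A, B) -> bool:
-- 	ans = 0
--
-- 	while True:
-- 		if num // 10 == 0:
-- 			ans += num
-- 			break
-- 		ans += num % 10
-- 		num //= 10
--
-- 	if A <= ans and ans <= B:
-- 		return True
-- 	else:
-- 		return False
-- ===== SOURCE B (Python) =====
-- def calc(num, A, B) -> bool:
--     s = sum(int(c) for c in str(num))
--     return A <= s <= B
-- ===== Notes on version B (the rewrite author's own statement) =====
-- stated objective: idiomatic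
-- what changed: Replaces the arithmetic mod/div digit-extraction while-loop with a digit sum computed by traversing the decimal string representation, returning the inclusive range check directly.
import Mathlib
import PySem

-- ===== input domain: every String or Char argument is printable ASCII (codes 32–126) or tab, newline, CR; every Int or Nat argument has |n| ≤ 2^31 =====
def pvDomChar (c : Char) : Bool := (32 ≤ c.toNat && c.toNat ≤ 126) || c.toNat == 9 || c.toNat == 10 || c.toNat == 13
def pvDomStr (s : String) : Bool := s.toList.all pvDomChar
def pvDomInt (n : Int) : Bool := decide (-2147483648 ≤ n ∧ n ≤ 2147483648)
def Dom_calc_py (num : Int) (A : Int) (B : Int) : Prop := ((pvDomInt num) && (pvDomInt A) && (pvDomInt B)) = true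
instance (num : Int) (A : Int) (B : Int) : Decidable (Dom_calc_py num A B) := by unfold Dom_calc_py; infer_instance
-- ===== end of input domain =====

-- B computes the digit sum by traversing str(num) instead of A's mod/div extraction loop (idiomatic, same cost).
-- A infinite-loops on negative num (num // 10 never reaches 0); Pre_ restricts to 0 ≤ num, where both return.


-- ===== PORT A =====
-- the 'while True' loop; fuel only makes it total (64 ≥ digit count of any |num| ≤ 2^31; on 0 ≤ num the
-- loop always breaks well within the fuel, so the port is exact on Pre_)
def calcLoopA (fuel : Nat) (num ans : Int) : Int :=
  match fuel with
  | 0 => ans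
  | fuel + 1 =>
    if PySem.Int.floordiv num 10 = 0 then ans + num
    else calcLoopA fuel (PySem.Int.floordiv num 10) (ans + PySem.Int.mod num 10)

def calc_py (num : Int) (A : Int) (B : Int) : Bool :=
  let ans := calcLoopA 64 num 0
  if A ≤ ans ∧ ans ≤ B then true else false

-- ===== PORT B =====
-- sum(int(c) for c in str(num)); int(c) is PySem.Int.ofChars? [c] ('.getD 0' is never the raising case
-- on Pre_, where every character of str(num) is a digit)
def calc_py_alt (num : Int) (A : Int) (B : Int) : Bool :=
  let s := ((PySem.Int.toChars num).map (fun c => (PySem.Int.ofChars? [c]).getD 0)).sum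
  decide (A ≤ s ∧ s ≤ B)

-- ===== PRECONDITION & SPEC =====
-- Pre_ excludes num < 0, on which Python A never returns (the while-loop's 'num // 10 == 0' is never true).
def Pre_calc_py (num : Int) (_A : Int) (_B : Int) : Prop := 0 ≤ num
instance (num : Int) (A : Int) (B : Int) : Decidable (Pre_calc_py num A B) := by unfold Pre_calc_py; infer_instance
def pvWitness_calc_py : Int × Int × Int := (91, 2, 15)

def Spec_calc_py (num : Int) (A : Int) (B : Int) (out : Bool) : Prop := out = calc_py_alt num A B
instance (num : Int) (A : Int) (B : Int) (out : Bool) : Decidable (Spec_calc_py num A B out) := by unfold Spec_calc_py; infer_instance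

-- ===== CLAIM (what is proved, stated in full; the proofs are below) =====
def Claim_equal_calc_py : Prop := ∀ (num : Int) (A : Int) (B : Int), Dom_calc_py num A B → Pre_calc_py num A B → Spec_calc_py num A B (calc_py num A B)

-- ===== LEMMAS AND PROOFS =====

-- the digit-character list of n (most significant first), the common reference for both ports
def myDigits (n : Nat) : List Char :=
  if h : n / 10 = 0 then [Nat.digitChar (n % 10)]
  else myDigits (n / 10) ++ [Nat.digitChar (n % 10)]
  termination_by n
  decreasing_by omega

-- value of one digit character under B's per-character int()
def charVal (c : Char) : Int := (PySem.Int.ofChars? [c]).getD 0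

theorem charVal_digitChar (n : Nat) (h : n < 10) : charVal (Nat.digitChar n) = (n : Int) := by
  interval_cases n <;> decide

-- the shared digit sum
def S (n : Nat) : Int := ((myDigits n).map charVal).sum

theorem S_lt_ten (n : Nat) (h : n < 10) : S n = (n : Int) := by
  have h0 : n / 10 = 0 := by omega
  have h1 : n % 10 = n := by omega
  simp [S, myDigits, h0, h1, charVal_digitChar n h]

theorem S_ge_ten (n : Nat) (h : ¬ n / 10 = 0) : S n = S (n / 10) + (n % 10 : Nat) := by
  rw [S, myDigits]
  simp [h, S, charVal_digitChar (n % 10) (by omega)]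

-- A's loop computes ans + S num, given enough fuel
theorem calcLoopA_eq_S (fuel : Nat) : ∀ (num ans : Int), 0 ≤ num → num.toNat < 10 ^ fuel →
    calcLoopA fuel num ans = ans + S num.toNat := by
  induction fuel with
  | zero =>
    intro num ans h0 hlt
    have : num = 0 := by omega
    subst this
    simp [calcLoopA, S_lt_ten 0 (by omega)]
  | succ f ih =>
    intro num ans h0 hlt
    have hd : PySem.Int.floordiv num 10 = num / 10 :=
      PySem.Int.floordiv_eq_ediv_of_pos (by omega)
    have hm : PySem.Int.mod num 10 = num % 10 :=
      PySem.Int.mod_eq_emod_of_pos (by omega)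
    rw [calcLoopA, hd, hm]
    by_cases hz : num / 10 = 0
    · have hlt10 : num < 10 := by omega
      rw [if_pos hz, S_lt_ten num.toNat (by omega)]
      omega
    · rw [if_neg hz]
      have hdiv0 : 0 ≤ num / 10 := by positivity
      have htn : (num / 10).toNat = num.toNat / 10 := by omega
      have hmn : num % 10 = ((num.toNat % 10 : Nat) : Int) := by omega
      rw [ih (num / 10) (ans + num % 10) hdiv0 (by
        rw [htn]; rw [pow_succ] at hlt; omega)]
      rw [htn, S_ge_ten num.toNat (by omega), hmn]
      ring

-- toDigitsCore with enough fuel is myDigits (accumulator appended)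
theorem toDigitsCore_eq_myDigits (fuel : Nat) : ∀ (n : Nat) (l : List Char), n < fuel →
    Nat.toDigitsCore 10 fuel n l = myDigits n ++ l := by
  induction fuel with
  | zero => intro n l h; omega
  | succ f ih =>
    intro n l h
    rw [Nat.toDigitsCore, myDigits]
    by_cases hz : n / 10 = 0
    · simp [hz]
    · have hlt : n / 10 < f := by omega
      simp only [hz, if_neg, dif_neg, not_false_iff]
      rw [ih (n / 10) (Nat.digitChar (n % 10) :: l) hlt]
      simp

-- B's digit sum over str(num) is S, for 0 ≤ num
theorem alt_sum_eq_S (num : Int) (h0 : 0 ≤ num) :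
    ((PySem.Int.toChars num).map (fun c => (PySem.Int.ofChars? [c]).getD 0)).sum = S num.toNat := by
  have hneg : ¬ num < 0 := by omega
  rw [PySem.Int.toChars]
  rw [if_neg hneg]
  rw [Nat.toDigits, toDigitsCore_eq_myDigits (num.toNat + 1) num.toNat [] (by omega)]
  simp only [List.append_nil, S]
  rfl

-- ===== VERDICT (by name: the statement is the Claim_ definition above) =====
theorem calc_py_spec : Claim_equal_calc_py := by
  intro num A B hdom hpre
  have h0 : 0 ≤ num := hpre
  have hlt : num.toNat < 10 ^ 64 := by
    have : num ≤ 2147483648 := by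
      simp [Dom_calc_py, pvDomInt] at hdom
      exact hdom.1.1.2
    have h10 : (2147483649 : Nat) < 10 ^ 64 := by norm_num
    omega
  unfold Spec_calc_py calc_py calc_py_alt
  rw [alt_sum_eq_S num h0, calcLoopA_eq_S 64 num 0 h0 hlt, zero_add]
  by_cases hc : A ≤ S num.toNat ∧ S num.toNat ≤ B
  · simp [hc]
  · simp [hc]
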